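-- pv_equiv track=rewrite | github.com/TNTBoss971/license-plate-generator | src/license-plate-generator/license_plate_generator.py | find_end_vowels
-- ===== SOURCE A (Python) =====
-- def find_end_vowels(txt: str):
--     """
--     find vowels that are on the start and end of words
--     """
--     pos = 0
--     index_output = []
--     # for each letter in the input
--     for letter in txt:
--         # if the letter is on the very start or end,
--         # or it has a space on either side
--         if (pos==len(txt)-1 or pos==0 or txt[pos-1]==" " or
--         txt[pos+1]==" "):
--             # and its a vowel
--             if letter in "AEIOU":
--                 # add the vowel to the output
--                 index_output.append(pos)
--         pos += 1
--
--     return index_output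
-- ===== SOURCE B (Python) =====
-- def find_end_vowels(txt: str):
--     """
--     find vowels that are on the start and end of words
--     (word = maximal run of non-space characters; emit start index if its
--     first char is an uppercase vowel, end index if its last char is and
--     the word has more than one character)
--     """
--     out = []
--     n = len(txt)
--     i = 0
--     while i < n:
--         if txt[i] == " ":
--             i += 1
--             continue
--         j = i + 1
--         while j < n and txt[j] != " ":
--             j += 1
--         if txt[i] in "AEIOU":
--             out.append(i)
--         if j - i > 1 and txt[j - 1] in "AEIOU":
--             out.append(j - 1)
--         i = j
--     return out
-- ===== Notes on version B (the rewrite author's own statement) =====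
-- stated objective: alternative
-- what changed: B scans space-delimited word runs left to right and emits each run's start index (if its first char is an uppercase vowel) and end index (if its last char is and the run is longer than 1), instead of A's per-character neighbour/boundary test with txt[pos-1]/txt[pos+1] lookups.
import Mathlib
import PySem

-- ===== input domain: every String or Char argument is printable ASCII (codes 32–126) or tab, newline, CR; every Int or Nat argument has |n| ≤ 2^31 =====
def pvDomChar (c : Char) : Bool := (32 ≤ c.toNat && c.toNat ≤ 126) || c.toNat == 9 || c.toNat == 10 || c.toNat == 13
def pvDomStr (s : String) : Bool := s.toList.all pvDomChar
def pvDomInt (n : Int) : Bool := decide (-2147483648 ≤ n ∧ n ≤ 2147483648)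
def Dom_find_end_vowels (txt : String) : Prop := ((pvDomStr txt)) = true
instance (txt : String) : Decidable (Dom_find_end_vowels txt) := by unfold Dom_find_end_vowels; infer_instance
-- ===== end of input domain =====

-- B rewrites the per-character boundary test of A as a single left-to-right scan over
-- space-delimited word runs, emitting each run's start/end vowel positions directly (objective: alternative).

-- letter in "AEIOU"
def pvIsVowel (c : Char) : Bool := "AEIOU".toList.contains c

-- ===== PORT A =====
-- the boundary condition of A's if, verbatim
def pvCondA (cs : List Char) (pos : Int) : Bool :=
  pos == (cs.length : Int) - 1 || pos == 0 ||
  PySem.List.pyGet? cs (pos - 1) == some ' ' ||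
  PySem.List.pyGet? cs (pos + 1) == some ' '

-- A's loop body: state = (pos, index_output)
def pvStepA (cs : List Char) (st : Int × List Int) (letter : Char) : Int × List Int :=
  (st.1 + 1,
   if pvCondA cs st.1 then
     (if pvIsVowel letter then st.2 ++ [st.1] else st.2)
   else st.2)

def find_end_vowels (txt : String) : List Int :=
  let cs := txt.toList
  (cs.foldl (pvStepA cs) (0, [])).2

-- ===== PORT B =====
-- outer while loop of Source B; first argument is the whole text (for txt[j-1]),
-- recursion is on the remaining suffix txt[i:], i the absolute index
def pvAltGo (cs : List Char) : List Char → Int → List Int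
  | [], _ => []
  | c :: l, i =>
    if c = ' ' then pvAltGo cs l (i + 1)
    else
      -- inner while: j scans past the non-space run
      let t := l.takeWhile (fun x => x ≠ ' ')
      let j : Int := i + 1 + (t.length : Int)
      (if pvIsVowel c then [i] else []) ++
      (if 1 < j - i && pvIsVowel (PySem.List.pyGetD cs (j - 1) ' ') then [j - 1] else []) ++
      pvAltGo cs (l.dropWhile (fun x => x ≠ ' ')) j
termination_by l => l.length
decreasing_by
  · simp only [List.length_cons]; omega
  · have := List.length_dropWhile_le (fun x => x ≠ ' ') l
    simp only [List.length_cons]; omega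

def find_end_vowels_alt (txt : String) : List Int :=
  let cs := txt.toList
  pvAltGo cs cs 0

-- ===== PRECONDITION & SPEC =====
def Spec_find_end_vowels (txt : String) (out : List Int) : Prop := out = find_end_vowels_alt txt
instance (txt : String) (out : List Int) : Decidable (Spec_find_end_vowels txt out) := by unfold Spec_find_end_vowels; infer_instance

-- ===== CLAIM (what is proved, stated in full; the proofs are below) =====
def Claim_equal_find_end_vowels : Prop := ∀ (txt : String), Dom_find_end_vowels txt → Spec_find_end_vowels txt (find_end_vowels txt)

-- ===== LEMMAS AND PROOFS =====

-- common characterisation: per-position contributions of A's condition over a suffix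
def pvSpecFrom (cs : List Char) : List Char → Int → List Int
  | [], _ => []
  | c :: l, k => (if pvCondA cs k && pvIsVowel c then [k] else []) ++ pvSpecFrom cs l (k + 1)

lemma loopA (cs : List Char) : ∀ (l : List Char) (k : Int) (out : List Int),
    (l.foldl (pvStepA cs) (k, out)).2 = out ++ pvSpecFrom cs l k := by
  intro l
  induction l with
  | nil => intro k out; simp [pvSpecFrom]
  | cons c l ih =>
    intro k out
    simp only [List.foldl_cons, pvStepA, pvSpecFrom]
    rw [ih]
    by_cases hc : pvCondA cs k = true <;> by_cases hv : pvIsVowel c = true <;>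
      simp [hc, hv]

lemma specFrom_append (cs : List Char) : ∀ (a b : List Char) (k : Int),
    pvSpecFrom cs (a ++ b) k = pvSpecFrom cs a k ++ pvSpecFrom cs b (k + a.length) := by
  intro a
  induction a with
  | nil => intro b k; simp [pvSpecFrom]
  | cons c a ih =>
    intro b k
    simp only [List.cons_append, pvSpecFrom, ih, List.length_cons]
    rw [List.append_assoc]
    congr 2
    push_cast
    ring_nf

lemma find_end_vowels_eq_spec (txt : String) :
    find_end_vowels txt = pvSpecFrom txt.toList txt.toList 0 := by
  unfold find_end_vowels
  rw [loopA]
  simp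

-- evaluations of A's boundary condition
lemma condA_first (cs : List Char) (k : Nat)
    (h : k = 0 ∨ cs[k-1]? = some ' ') : pvCondA cs (k : Int) = true := by
  rcases h with h | h
  · simp [pvCondA, h]
  · rcases Nat.eq_zero_or_pos k with h0 | h0
    · simp [pvCondA, h0]
    · have hc : (k : Int) - 1 = ((k-1 : Nat) : Int) := by omega
      simp only [pvCondA, hc, PySem.List.pyGet?_natCast]
      simp [h]

lemma condA_last (cs : List Char) (k : Nat)
    (h : k + 1 = cs.length ∨ cs[k+1]? = some ' ') : pvCondA cs (k : Int) = true := by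
  rcases h with h | h
  · have h1 : (k : Int) = (cs.length : Int) - 1 := by omega
    simp [pvCondA, h1]
  · have hc : (k : Int) + 1 = ((k+1 : Nat) : Int) := by omega
    simp only [pvCondA, hc, PySem.List.pyGet?_natCast]
    simp [h]

lemma condA_mid (cs : List Char) (k : Nat) (hk : 1 ≤ k) (hk2 : k + 1 < cs.length)
    (hp : cs[k-1]? ≠ some ' ') (hn : cs[k+1]? ≠ some ' ') : pvCondA cs (k : Int) = false := by
  have hc1 : (k : Int) - 1 = ((k-1 : Nat) : Int) := by omega
  have hc2 : (k : Int) + 1 = ((k+1 : Nat) : Int) := by omega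
  have h1 : (k : Int) ≠ (cs.length : Int) - 1 := by omega
  simp only [pvCondA, hc1, hc2, PySem.List.pyGet?_natCast]
  simp [hp, hn, h1]
  omega

lemma head_dropWhile (p : Char → Bool) (l : List Char) (x : Char)
    (h : (l.dropWhile p).head? = some x) : p x = false := by
  induction l with
  | nil => simp at h
  | cons c l ih => by_cases hc : p c <;> simp [hc] at h <;> simp_all

lemma getElem?_eq_getLastD (t : List Char) (h : t ≠ []) :
    t[t.length-1]? = some (t.getLastD ' ') := by
  rw [List.getLastD_eq_getLast?, ← List.getLast?_eq_getElem?]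
  simp [List.getLast?_eq_some_getLast h]

-- contributions of the characters of a word run after its first character
lemma run_tail (cs : List Char) : ∀ (t : List Char) (k : Nat) (r : List Char),
    cs.drop k = t ++ r → (∀ x ∈ t, x ≠ ' ') →
    1 ≤ k → cs[k-1]? ≠ some ' ' →
    (r.head? = some ' ' ∨ r = []) → t ≠ [] →
    pvSpecFrom cs t (k : Int) =
      if pvIsVowel (t.getLastD ' ') then [((k + t.length - 1 : Nat) : Int)] else [] := by
  intro t
  induction t with
  | nil => intro k r _ _ _ _ _ hne; exact absurd rfl hne
  | cons d t' ih =>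
    intro k r hdrop hmem hk hprev hr _
    have hklt : k < cs.length := by
      by_contra hh
      have : cs.drop k = [] := List.drop_eq_nil_of_le (by omega)
      rw [this] at hdrop; simp at hdrop
    have hdk : cs[k]? = some d := by
      have h0 : (cs.drop k)[(0:Nat)]? = cs[k+0]? := List.getElem?_drop
      rw [hdrop] at h0; simpa using h0.symm
    have hdrop1 : cs.drop (k+1) = t' ++ r := by
      have h2 : (cs.drop k).drop 1 = cs.drop (k+1) := by rw [List.drop_drop]
      rw [hdrop] at h2; simpa using h2.symm
    cases t' with
    | nil =>
      have hcond : pvCondA cs (k : Int) = true := by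
        apply condA_last
        rcases hr with hr | hr
        · right
          cases r with
          | nil => simp at hr
          | cons x r' =>
            simp at hr
            have h1 : (cs.drop k)[(1:Nat)]? = cs[k+1]? := List.getElem?_drop
            rw [hdrop] at h1
            simp at h1
            rw [← h1, hr]
        · left
          have := congrArg List.length hdrop
          rw [List.length_drop, hr] at this
          simp at this
          omega
      simp [pvSpecFrom, hcond]
    | cons d' t'' =>
      have hcond : pvCondA cs (k : Int) = false := by
        have hlen := congrArg List.length hdrop
        rw [List.length_drop] at hlen
        simp at hlen
        apply condA_mid cs k hk (by omega) hprev
        have h1 : (cs.drop k)[(1:Nat)]? = cs[k+1]? := List.getElem?_drop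
        rw [hdrop] at h1
        simp at h1
        rw [← h1]
        have : d' ≠ ' ' := hmem d' (by simp)
        simp [this]
      have hih := ih (k+1) r hdrop1 (fun x hx => hmem x (by simp [hx]))
        (by omega) (by simp [hdk]; exact hmem d (by simp)) hr (by simp)
      have hstep : pvSpecFrom cs (d :: d' :: t'') (k : Int)
          = (if pvCondA cs (k : Int) && pvIsVowel d then [(k : Int)] else [])
            ++ pvSpecFrom cs (d' :: t'') ((k : Int) + 1) := rfl
      have hcast : (k : Int) + 1 = ((k+1 : Nat) : Int) := by omega
      rw [hstep, hcond, hcast, hih]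
      simp only [Bool.false_and, List.getLastD_cons, List.length_cons]
      simp only [Bool.false_eq_true, if_false, List.nil_append]
      split_ifs
      · simp only [List.cons.injEq, and_true]
        congr 1
        omega
      · rfl

-- the outer loop of B agrees with the per-position characterisation
lemma altGo_eq (cs : List Char) : ∀ (m : Nat) (suf : List Char) (k : Nat),
    suf.length ≤ m → cs.drop k = suf →
    (k = 0 ∨ cs[k-1]? = some ' ' ∨ suf.head? = some ' ' ∨ suf = []) →
    pvAltGo cs suf (k : Int) = pvSpecFrom cs suf (k : Int) := by
  intro m
  induction m with
  | zero =>
    intro suf k hm _ _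
    have : suf = [] := List.eq_nil_of_length_eq_zero (by omega)
    subst this; simp [pvAltGo, pvSpecFrom]
  | succ m ih =>
    intro suf k hm hdrop hinv
    cases suf with
    | nil => simp [pvAltGo, pvSpecFrom]
    | cons c l =>
      have hklt : k < cs.length := by
        by_contra hh
        have : cs.drop k = [] := List.drop_eq_nil_of_le (by omega)
        rw [this] at hdrop; simp at hdrop
      have hck : cs[k]? = some c := by
        have h0 : (cs.drop k)[(0:Nat)]? = cs[k+0]? := List.getElem?_drop
        rw [hdrop] at h0; simpa using h0.symm
      have hdrop1 : cs.drop (k+1) = l := by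
        have h2 : (cs.drop k).drop 1 = cs.drop (k+1) := by rw [List.drop_drop]
        rw [hdrop] at h2; simpa using h2.symm
      have hlen : cs.length - k = l.length + 1 := by
        have := congrArg List.length hdrop
        rw [List.length_drop] at this
        simp at this
        omega
      simp at hm
      by_cases hc : c = ' '
      · -- space: skip
        have hrec := ih l (k+1) (by omega) hdrop1
          (Or.inr (Or.inl (by simpa [hc] using hck)))
        have hcast : (k : Int) + 1 = ((k+1 : Nat) : Int) := by omega
        have hvow : pvIsVowel c = false := by subst hc; decide
        have hstep : pvSpecFrom cs (c :: l) (k : Int)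
            = (if pvCondA cs (k : Int) && pvIsVowel c then [(k : Int)] else [])
              ++ pvSpecFrom cs l ((k : Int) + 1) := rfl
        have hstepB : pvAltGo cs (c :: l) (k : Int) = pvAltGo cs l ((k : Int) + 1) := by
          simp [pvAltGo, hc]
        rw [hstepB, hstep, hcast, hrec, hvow]
        simp
      · -- a word run
        have hcond : pvCondA cs (k : Int) = true := by
          apply condA_first
          rcases hinv with h | h | h | h
          · exact Or.inl h
          · exact Or.inr h
          · simp at h; exact absurd h hc
          · simp at h
        set t := l.takeWhile (fun x => x ≠ ' ') with ht
        set r := l.dropWhile (fun x => x ≠ ' ') with hr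
        have hl : t ++ r = l := List.takeWhile_append_dropWhile
        have htmem : ∀ x ∈ t, x ≠ ' ' := by
          intro x hx
          have := List.mem_takeWhile_imp hx
          simpa using this
        have hrhead : r.head? = some ' ' ∨ r = [] := by
          cases hh : r with
          | nil => exact Or.inr rfl
          | cons y r' =>
            left
            have hy : (List.dropWhile (fun x => decide (x ≠ ' ')) l).head? = some y := by
              rw [← hr, hh]; rfl
            have hthis := head_dropWhile (fun x => decide (x ≠ ' ')) l y hy
            simp only [decide_eq_false_iff_not, Decidable.not_not] at hthis
            simp [hthis]
        have hdropt : cs.drop (k + 1 + t.length) = r := by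
          have : cs.drop (k+1+t.length) = (cs.drop (k+1)).drop t.length := by
            rw [List.drop_drop]
          rw [this, hdrop1, ← hl, List.drop_left]
        have hrec := ih r (k + 1 + t.length)
          (by have := congrArg List.length hl; simp at this; omega)
          hdropt
          (Or.inr (Or.inr hrhead))
        have hcast : (k : Int) + 1 + ((t.length : Nat) : Int) = ((k + 1 + t.length : Nat) : Int) := by
          push_cast; ring
        -- unfold B's run step
        rw [show (c :: l) = c :: l from rfl]
        simp only [pvAltGo, if_neg hc]
        rw [← ht, ← hr]
        conv_rhs => rw [← hl]
        rw [show (c :: (t ++ r)) = c :: t ++ r from rfl]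
        rw [show pvSpecFrom cs (c :: t ++ r) (k : Int)
              = pvSpecFrom cs (c :: t) (k : Int) ++ pvSpecFrom cs r ((k : Int) + (c :: t).length) from
            specFrom_append cs (c :: t) r (k : Int)]
        simp only [pvSpecFrom, hcond, Bool.true_and]
        rw [hcast, hrec]
        have hmid : (if 1 < ((k + 1 + t.length : Nat) : Int) - (k : Int) &&
              pvIsVowel (PySem.List.pyGetD cs (((k + 1 + t.length : Nat) : Int) - 1) ' ') then
              [((k + 1 + t.length : Nat) : Int) - 1] else [])
            = pvSpecFrom cs t ((k : Int) + 1) := by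
          cases hht : t with
          | nil =>
            have hfalse : ¬ (1 < ((k + 1 + ([] : List Char).length : Nat) : Int) - (k : Int)) := by
              simp
            simp [pvSpecFrom]
          | cons u t' =>
            rw [← hht]
            have htne : t ≠ [] := by rw [hht]; simp
            have htlen : 1 ≤ t.length := by rw [hht]; simp
            have hlast : cs[k + t.length]? = some (t.getLastD ' ') := by
              have h1 : (cs.drop (k+1))[(t.length - 1 : Nat)]? = cs[k+1+(t.length-1)]? :=
                List.getElem?_drop
              rw [hdrop1, ← hl] at h1
              have h2 : (t ++ r)[t.length - 1]? = t[t.length-1]? := by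
                apply List.getElem?_append_left
                omega
              rw [h2, getElem?_eq_getLastD t htne] at h1
              have hidx : k + t.length = k + 1 + (t.length - 1) := by omega
              rw [hidx]
              exact h1.symm
            have e1 : ((k + 1 + t.length : Nat) : Int) - 1 = ((k + t.length : Nat) : Int) := by
              push_cast; ring
            have e2 : decide (1 < ((k + 1 + t.length : Nat) : Int) - (k : Int)) = true := by
              simp; omega
            rw [e1]
            have hg : PySem.List.pyGetD cs ((k + t.length : Nat) : Int) ' ' = t.getLastD ' ' := by
              rw [PySem.List.pyGetD_natCast]
              simp [List.getD, hlast]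
            rw [hg, e2]
            simp only [Bool.true_and]
            have hcast1 : (k : Int) + 1 = ((k+1 : Nat) : Int) := by omega
            rw [hcast1, run_tail cs t (k+1) r (by rw [hdrop1, hl]) htmem (by omega)
              (by simp [hck]; exact hc) hrhead htne]
            have hix : ((k + t.length : Nat) : Int)
                = ((k + 1 + t.length - 1 : Nat) : Int) := by omega
            rw [hix]
        have hc2 : (k : Int) + (((c :: t).length : Nat) : Int) = ((k + 1 + t.length : Nat) : Int) := by
          push_cast [List.length_cons]; omega
        rw [hc2, hmid]

theorem find_end_vowels_spec : Claim_equal_find_end_vowels := by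
  intro txt _
  unfold Spec_find_end_vowels
  rw [find_end_vowels_eq_spec]
  unfold find_end_vowels_alt
  have h := altGo_eq txt.toList txt.toList.length txt.toList 0 (le_refl _) (by simp)
    (Or.inl rfl)
  simpa using h.symm
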